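-- pv_equiv track=rewrite | github.com/Nelzouki22/Split-houses | Split houses/Split_houses.py | split_houses
-- ===== SOURCE A (Python) =====
-- def split_houses(n, village):
--     # تحويل السلسلة إلى قائمة لتسهيل التعديلات
--     village_list = list(village)
--
--     # عدد الأسوار التي نحتاج لوضعها
--     fences_needed = 0
--
--     # نقوم بإنشاء قائمة من التعديلات المحتملة
--     for i in range(n):
--         if village_list[i] == 'H':
--             # وضع أسوار على اليمين واليسار من المنازل
--             if i > 0 and village_list[i - 1] == '.':
--                 village_list[i - 1] = 'B'
--                 fences_needed += 1
--             if i < n - 1 and village_list[i + 1] == '.':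
--                 village_list[i + 1] = 'B'
--                 fences_needed += 1
--
--     # تحويل القائمة المعدلة إلى سلسلة
--     modified_village = ''.join(village_list)
--
--     # التحقق مما إذا كان التعديل يلبي الشروط
--     for i in range(n):
--         if village[i] == 'H':
--             left = i
--             while left >= 0 and village[left] != 'H':
--                 left -= 1
--             right = i
--             while right < n and village[right] != 'H':
--                 right += 1
--             if left >= 0 and village[left] == 'H':
--                 left += 1
--             if right < n and village[right] == 'H':
--                 right -= 1
--             if left == i and right == i:
--                 continue
--             if not (i - left == right - i):
--                 return "NO\n"
--
--     return f"YES\n{modified_village}"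
-- ===== SOURCE B (Python) =====
-- def split_houses(n, village):
--     # Single pass over the original string: a '.' inside the first n characters
--     # becomes 'B' when it has an 'H' neighbour reachable by the fence rules.
--     out = []
--     for i, c in enumerate(village):
--         if i < n and c == '.' and ((i > 0 and village[i - 1] == 'H')
--                                    or (i < n - 1 and village[i + 1] == 'H')):
--             out.append('B')
--         else:
--             out.append(c)
--     return f"YES\n{''.join(out)}"
-- ===== Notes on version B (the rewrite author's own statement) =====
-- stated objective: simpler
-- what changed: Drops A's in-place mutation and its second validation loop (which can never return 'NO'); B builds the output in one pass over the original string, emitting 'B' where a '.' in the first n characters has an 'H' neighbour.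
import Mathlib
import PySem

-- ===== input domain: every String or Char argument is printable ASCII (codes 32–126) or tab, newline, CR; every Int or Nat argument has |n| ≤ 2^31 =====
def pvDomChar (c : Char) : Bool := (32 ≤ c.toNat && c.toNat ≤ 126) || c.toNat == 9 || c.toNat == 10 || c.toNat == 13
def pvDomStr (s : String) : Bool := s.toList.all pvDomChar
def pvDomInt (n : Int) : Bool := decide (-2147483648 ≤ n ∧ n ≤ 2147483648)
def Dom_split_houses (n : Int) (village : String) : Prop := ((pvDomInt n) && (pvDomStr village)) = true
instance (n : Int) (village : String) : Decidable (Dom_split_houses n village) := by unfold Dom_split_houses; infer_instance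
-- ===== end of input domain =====

-- B drops A's in-place mutation and its validation loop (which never fires) and
-- builds the answer in one pass over the original string; same cost, simpler.

-- ===== PORT A =====
-- one step of A's first loop: state = (village_list, fences_needed)
def pvStepA (n : Int) (st : List Char × Int) (i : Int) : List Char × Int :=
  if PySem.List.pyGetD st.1 i ' ' = 'H' then
    let st1 := if 0 < i ∧ PySem.List.pyGetD st.1 (i - 1) ' ' = '.' then
        (PySem.List.pySetD st.1 (i - 1) 'B', st.2 + 1) else st
    if i < n - 1 ∧ PySem.List.pyGetD st1.1 (i + 1) ' ' = '.' then
        (PySem.List.pySetD st1.1 (i + 1) 'B', st1.2 + 1) else st1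
  else st

-- 'while left >= 0 and village[left] != H: left -= 1'
def pvWhileLeft (village : List Char) (left : Int) : Int :=
  if h : 0 ≤ left ∧ PySem.List.pyGetD village left ' ' ≠ 'H' then pvWhileLeft village (left - 1)
  else left
termination_by (left + 1).toNat
decreasing_by
  rw [Int.sub_add_cancel]
  exact (Int.toNat_lt_toNat (Int.lt_add_one_iff.mpr h.1)).mpr (lt_add_one left)

-- 'while right < n and village[right] != H: right += 1'
def pvWhileRight (n : Int) (village : List Char) (right : Int) : Int :=
  if h : right < n ∧ PySem.List.pyGetD village right ' ' ≠ 'H' then pvWhileRight n village (right + 1)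
  else right
termination_by (n - right).toNat
decreasing_by
  exact (Int.toNat_lt_toNat (Int.sub_pos.mpr h.1)).mpr (sub_lt_sub_left (lt_add_one right) n)

-- A's second loop, with early return "NO\n" modelled as 'false'
def pvCheckA (n : Int) (village : List Char) : List Int → Bool
  | [] => true
  | i :: rest =>
    if PySem.List.pyGetD village i ' ' = 'H' then
      let left := pvWhileLeft village i
      let right := pvWhileRight n village i
      let left := if 0 ≤ left ∧ PySem.List.pyGetD village left ' ' = 'H' then left + 1 else left
      let right := if right < n ∧ PySem.List.pyGetD village right ' ' = 'H' then right - 1 else right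
      if left = i ∧ right = i then pvCheckA n village rest
      else if ¬ (i - left = right - i) then false
      else pvCheckA n village rest
    else pvCheckA n village rest

def split_houses (n : Int) (village : String) : String :=
  let village_list := village.toList
  let st := (PySem.List.pyRange 0 n 1).foldl (pvStepA n) (village_list, 0)
  let modified_village := String.ofList st.1
  if pvCheckA n village.toList (PySem.List.pyRange 0 n 1) then "YES\n" ++ modified_village
  else "NO\n"

-- ===== PORT B =====
def split_houses_alt (n : Int) (village : String) : String :=
  let vl := village.toList
  let out := (PySem.List.enumerate vl 0).map (fun p =>
    if p.1 < n ∧ p.2 = '.' ∧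
        ((0 < p.1 ∧ PySem.List.pyGetD vl (p.1 - 1) ' ' = 'H') ∨
         (p.1 < n - 1 ∧ PySem.List.pyGetD vl (p.1 + 1) ' ' = 'H')) then 'B' else p.2)
  "YES\n" ++ String.ofList out

-- ===== PRECONDITION & SPEC =====
-- Pre_ excludes exactly the inputs where A raises IndexError: n > len(village).
def Pre_split_houses (n : Int) (village : String) : Prop := n ≤ (village.toList.length : Int)
instance (n : Int) (village : String) : Decidable (Pre_split_houses n village) := by
  unfold Pre_split_houses; infer_instance

def pvWitness_split_houses : Int × String := (2, "H..")

def Spec_split_houses (n : Int) (village : String) (out : String) : Prop := out = split_houses_alt n village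
instance (n : Int) (village : String) (out : String) : Decidable (Spec_split_houses n village out) := by
  unfold Spec_split_houses; infer_instance

-- ===== CLAIM (what is proved, stated in full; the proofs are below) =====
def Claim_equal_split_houses : Prop := ∀ (n : Int) (village : String), Dom_split_houses n village → Pre_split_houses n village → Spec_split_houses n village (split_houses n village)

-- ===== LEMMAS AND PROOFS =====

def pvMark (n k : Int) (vl : List Char) (j : Nat) : Bool :=
  (vl.getD j ' ' == '.') &&
    ((decide ((j : Int) + 1 < k) && (vl.getD (j + 1) ' ' == 'H')) ||
     (decide (1 ≤ j) && decide ((j : Int) ≤ k) && decide ((j : Int) < n) && (vl.getD (j - 1) ' ' == 'H')))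

def pvBuild (n k : Int) (vl : List Char) : List Char :=
  (List.range vl.length).map (fun j => if pvMark n k vl j then 'B' else vl.getD j ' ')

theorem pvBuild_length (n k : Int) (vl : List Char) : (pvBuild n k vl).length = vl.length := by
  simp [pvBuild]

theorem pvBuild_getElem (n k : Int) (vl : List Char) (j : Nat) (hj : j < vl.length) :
    (pvBuild n k vl)[j]'(by simp [pvBuild_length, hj]) =
      if pvMark n k vl j then 'B' else vl.getD j ' ' := by
  simp [pvBuild]

theorem pvMark_iff (n k : Int) (vl : List Char) (j : Nat) :
    pvMark n k vl j = true ↔ (vl.getD j ' ' = '.' ∧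
      (((j : Int) + 1 < k ∧ vl.getD (j + 1) ' ' = 'H') ∨
       (1 ≤ j ∧ (j : Int) ≤ k ∧ (j : Int) < n ∧ vl.getD (j - 1) ' ' = 'H'))) := by
  simp [pvMark, and_assoc]


theorem pvBuild_zero (n : Int) (vl : List Char) : pvBuild n 0 vl = vl := by
  apply List.ext_getElem (by simp [pvBuild_length])
  intro j h1 h2
  rw [pvBuild_getElem n 0 vl j h2]
  have hzero : pvMark n 0 vl j = false := by
    cases h : pvMark n 0 vl j
    · rfl
    · exfalso
      rcases (pvMark_iff n 0 vl j).1 h with ⟨-, ⟨ha, -⟩ | ⟨ha, hb, -, -⟩⟩ <;> omega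
  rw [hzero]
  simpa using (List.getD_eq_getElem vl ' ' h2)

theorem pvMark_eq_of_iff {a b : Bool} (h : (a = true) ↔ (b = true)) : a = b := by
  cases a <;> cases b <;> simp_all

theorem pvMark_succ_ne (n k : Int) (vl : List Char) (j : Nat)
    (h1 : (j : Int) + 1 ≠ k) (h2 : (j : Int) ≠ k + 1) :
    pvMark n (k + 1) vl j = pvMark n k vl j := by
  apply pvMark_eq_of_iff
  rw [pvMark_iff, pvMark_iff]
  constructor
  · rintro ⟨hd, ⟨ha, hb⟩ | ⟨ha, hb, hc, he⟩⟩
    · exact ⟨hd, Or.inl ⟨by omega, hb⟩⟩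
    · exact ⟨hd, Or.inr ⟨ha, by omega, hc, he⟩⟩
  · rintro ⟨hd, ⟨ha, hb⟩ | ⟨ha, hb, hc, he⟩⟩
    · exact ⟨hd, Or.inl ⟨by omega, hb⟩⟩
    · exact ⟨hd, Or.inr ⟨ha, by omega, hc, he⟩⟩

theorem pvMark_succ_notH (n k : Int) (vl : List Char) (j : Nat) (kN : Nat) (hkN : (kN : Int) = k)
    (hH : vl.getD kN ' ' ≠ 'H') :
    pvMark n (k + 1) vl j = pvMark n k vl j := by
  apply pvMark_eq_of_iff
  rw [pvMark_iff, pvMark_iff]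
  constructor
  · rintro ⟨hd, ⟨ha, hb⟩ | ⟨ha, hb, hc, he⟩⟩
    · refine ⟨hd, Or.inl ⟨?_, hb⟩⟩
      by_cases hjk : (j : Int) + 1 = k
      · exfalso; apply hH; have : j + 1 = kN := by omega
        rw [← this]; exact hb
      · omega
    · refine ⟨hd, Or.inr ⟨ha, ?_, hc, he⟩⟩
      by_cases hjk : (j : Int) = k + 1
      · exfalso; apply hH; have : j - 1 = kN := by omega
        rw [← this]; exact he
      · omega
  · rintro ⟨hd, ⟨ha, hb⟩ | ⟨ha, hb, hc, he⟩⟩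
    · exact ⟨hd, Or.inl ⟨by omega, hb⟩⟩
    · exact ⟨hd, Or.inr ⟨ha, by omega, hc, he⟩⟩

theorem pvStepA_fst (n : Int) (st : List Char × Int) (i : Int) :
    (pvStepA n st i).1 = (pvStepA n (st.1, 0) i).1 := by
  simp only [pvStepA]; split_ifs <;> simp_all

theorem pvStepA_build (n : Int) (vl : List Char) (k : Nat)
    (hk : (k : Int) < n) (hn : n ≤ (vl.length : Int)) :
    (pvStepA n (pvBuild n (k : Int) vl, 0) (k : Int)).1 = pvBuild n ((k : Int) + 1) vl := by
  have hkm : k < vl.length := by omega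
  have hlen : (pvBuild n (k : Int) vl).length = vl.length := pvBuild_length n (k : Int) vl
  have hlook : ∀ t : Nat, t < vl.length →
      PySem.List.pyGetD (pvBuild n (k : Int) vl) ((t : Nat) : Int) ' ' =
        if pvMark n (k : Int) vl t then 'B' else vl.getD t ' ' := by
    intro t ht
    rw [PySem.List.pyGetD_natCast, List.getD_eq_getElem _ _ (by rw [hlen]; exact ht)]
    exact pvBuild_getElem n (k : Int) vl t ht
  -- pvMark at k+1 never holds at time k
  have hm_kp1 : pvMark n (k : Int) vl (k + 1) = false := by
    cases h : pvMark n (k : Int) vl (k + 1)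
    · rfl
    · exfalso
      rcases (pvMark_iff n (k : Int) vl (k + 1)).1 h with ⟨-, ⟨ha, -⟩ | ⟨-, hb, -, -⟩⟩
      · omega
      · omega
  -- value of the built list at k+1
  have hbk_kp1 : PySem.List.pyGetD (pvBuild n (k : Int) vl) ((k : Int) + 1) ' ' = vl.getD (k + 1) ' ' := by
    have hc : (k : Int) + 1 = ((k + 1 : Nat) : Int) := by omega
    by_cases hin : k + 1 < vl.length
    · rw [hc, hlook (k + 1) hin, hm_kp1]
      simp
    · rw [hc, PySem.List.pyGetD_natCast]
      rw [List.getD_eq_default _ _ (by omega), List.getD_eq_default _ _ (by omega)]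
  by_cases hH : vl.getD k ' ' = 'H'
  · -- a house at position k
    have hmkk : pvMark n (k : Int) vl k = false := by
      cases h : pvMark n (k : Int) vl k
      · rfl
      · exfalso
        have := (pvMark_iff n (k : Int) vl k).1 h
        rw [hH] at this
        exact absurd this.1 (by decide)
    have houter : PySem.List.pyGetD (pvBuild n (k : Int) vl) ((k : Nat) : Int) ' ' = 'H' := by
      rw [hlook k hkm, hmkk]
      simpa using hH
    -- pvMark at k+1 after the step
    have hmark_kp1 : pvMark n ((k : Int) + 1) vl (k + 1) = true ↔
        (vl.getD (k + 1) ' ' = '.' ∧ (k : Int) + 1 < n) := by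
      rw [pvMark_iff]
      constructor
      · rintro ⟨hd, ⟨ha, -⟩ | ⟨-, -, hc, -⟩⟩
        · exact ⟨hd, by omega⟩
        · exact ⟨hd, by omega⟩
      · rintro ⟨hd, hlt⟩
        exact ⟨hd, Or.inr ⟨by omega, by omega, by omega, by simpa using hH⟩⟩
    have hmark_km1 : 0 < k →
        (pvMark n ((k : Int) + 1) vl (k - 1) = true ↔ vl.getD (k - 1) ' ' = '.') := by
      intro hk0
      rw [pvMark_iff]
      constructor
      · rintro ⟨hd, -⟩; exact hd
      · intro hd
        refine ⟨hd, Or.inl ⟨by omega, ?_⟩⟩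
        rw [show k - 1 + 1 = k by omega]
        exact hH
    simp only [pvStepA]
    rw [if_pos houter]
    by_cases c1 : 0 < (k : Int) ∧ PySem.List.pyGetD (pvBuild n (k : Int) vl) ((k : Int) - 1) ' ' = '.'
    · have hk0 : 0 < k := by omega
      have hcast1 : (k : Int) - 1 = ((k - 1 : Nat) : Int) := by omega
      have hlk : vl.getD (k - 1) ' ' = '.' ∧ pvMark n (k : Int) vl (k - 1) = false := by
        have hv := c1.2
        rw [hcast1, hlook (k - 1) (by omega)] at hv
        cases h : pvMark n (k : Int) vl (k - 1)
        · rw [h] at hv; simpa using hv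
        · rw [h] at hv; simp at hv
      have hsetL : PySem.List.pySetD (pvBuild n (k : Int) vl) ((k : Int) - 1) 'B' =
          (pvBuild n (k : Int) vl).set (k - 1) 'B' := by
        rw [show (k : Int) - 1 = ((k - 1 : Nat) : Int) from hcast1, PySem.List.pySetD_natCast]
      rw [if_pos c1, hsetL]
      dsimp only
      have hsetval : PySem.List.pyGetD ((pvBuild n (k : Int) vl).set (k - 1) 'B') ((k : Int) + 1) ' ' =
          vl.getD (k + 1) ' ' := by
        have hc : (k : Int) + 1 = ((k + 1 : Nat) : Int) := by omega
        by_cases hin : k + 1 < vl.length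
        · rw [hc, PySem.List.pyGetD_natCast,
              List.getD_eq_getElem _ _ (by simp [hlen]; omega),
              List.getElem_set, if_neg (by omega)]
          rw [pvBuild_getElem n (k : Int) vl (k + 1) hin, hm_kp1]
          simp
        · rw [hc, PySem.List.pyGetD_natCast,
              List.getD_eq_default _ _ (by simp [hlen]; omega),
              List.getD_eq_default _ _ (by omega)]
      by_cases c2 : (k : Int) < n - 1 ∧
          PySem.List.pyGetD ((pvBuild n (k : Int) vl).set (k - 1) 'B') ((k : Int) + 1) ' ' = '.'
      · rw [if_pos c2]
        show PySem.List.pySetD ((pvBuild n (k : Int) vl).set (k - 1) 'B') ((k : Int) + 1) 'B' =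
          pvBuild n ((k : Int) + 1) vl
        rw [PySem.List.pySetD_of_nonneg _ _ (by omega), show ((k : Int) + 1).toNat = k + 1 by omega]
        apply List.ext_getElem (by simp [hlen, pvBuild_length])
        intro j hj1 hj2
        have hjm : j < vl.length := by simpa [pvBuild_length] using hj2
        rw [List.getElem_set, List.getElem_set, pvBuild_getElem n ((k : Int) + 1) vl j hjm]
        by_cases e2 : k + 1 = j
        · rw [if_pos e2]
          have : pvMark n ((k : Int) + 1) vl (k + 1) = true :=
            hmark_kp1.2 ⟨by rw [← hsetval]; exact c2.2, by omega⟩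
          rw [← e2, this]
          simp
        · rw [if_neg e2]
          by_cases e1 : k - 1 = j
          · rw [if_pos e1]
            have : pvMark n ((k : Int) + 1) vl (k - 1) = true := (hmark_km1 hk0).2 hlk.1
            rw [← e1, this]
            simp
          · rw [if_neg e1, pvBuild_getElem n (k : Int) vl j hjm,
                pvMark_succ_ne n (k : Int) vl j (by omega) (by omega)]
      · rw [if_neg c2]
        show (pvBuild n (k : Int) vl).set (k - 1) 'B' = pvBuild n ((k : Int) + 1) vl
        apply List.ext_getElem (by simp [hlen, pvBuild_length])
        intro j hj1 hj2
        have hjm : j < vl.length := by simpa [pvBuild_length] using hj2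
        rw [List.getElem_set, pvBuild_getElem n ((k : Int) + 1) vl j hjm]
        by_cases e1 : k - 1 = j
        · rw [if_pos e1]
          have : pvMark n ((k : Int) + 1) vl (k - 1) = true := (hmark_km1 hk0).2 hlk.1
          rw [← e1, this]
          simp
        · rw [if_neg e1]
          by_cases e2 : k + 1 = j
          · -- the right neighbour was not fenced: show marks agree there
            rw [pvBuild_getElem n (k : Int) vl j hjm, ← e2, hm_kp1]
            have : pvMark n ((k : Int) + 1) vl (k + 1) = false := by
              cases h : pvMark n ((k : Int) + 1) vl (k + 1)
              · rfl
              · exfalso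
                have hfac := hmark_kp1.1 h
                exact c2 ⟨by omega, by rw [hsetval]; exact hfac.1⟩
            rw [this]
          · rw [pvBuild_getElem n (k : Int) vl j hjm,
                pvMark_succ_ne n (k : Int) vl j (by omega) (by omega)]
    · rw [if_neg c1]
      dsimp only
      have hsetval2 : PySem.List.pyGetD (pvBuild n (k : Int) vl) ((k : Int) + 1) ' ' =
          vl.getD (k + 1) ' ' := hbk_kp1
      by_cases c2 : (k : Int) < n - 1 ∧
          PySem.List.pyGetD (pvBuild n (k : Int) vl) ((k : Int) + 1) ' ' = '.'
      · rw [if_pos c2]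
        show PySem.List.pySetD (pvBuild n (k : Int) vl) ((k : Int) + 1) 'B' =
          pvBuild n ((k : Int) + 1) vl
        rw [PySem.List.pySetD_of_nonneg _ _ (by omega), show ((k : Int) + 1).toNat = k + 1 by omega]
        apply List.ext_getElem (by simp [hlen, pvBuild_length])
        intro j hj1 hj2
        have hjm : j < vl.length := by simpa [pvBuild_length] using hj2
        rw [List.getElem_set, pvBuild_getElem n ((k : Int) + 1) vl j hjm]
        by_cases e2 : k + 1 = j
        · rw [if_pos e2]
          have : pvMark n ((k : Int) + 1) vl (k + 1) = true :=
            hmark_kp1.2 ⟨by rw [← hsetval2]; exact c2.2, by omega⟩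
          rw [← e2, this]
          simp
        · rw [if_neg e2, pvBuild_getElem n (k : Int) vl j hjm]
          by_cases e1 : 0 < k ∧ k - 1 = j
          · -- left neighbour not fenced because it was not '.', or was already 'B'
            rcases e1 with ⟨hk0, e1⟩
            subst e1
            by_cases hdot : vl.getD (k - 1) ' ' = '.'
            · have hmk : pvMark n (k : Int) vl (k - 1) = true := by
                cases h : pvMark n (k : Int) vl (k - 1)
                · exfalso
                  apply c1
                  refine ⟨by omega, ?_⟩
                  rw [show (k : Int) - 1 = ((k - 1 : Nat) : Int) by omega, hlook (k - 1) (by omega), h]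
                  simpa using hdot
                · rfl
              have hmk1 : pvMark n ((k : Int) + 1) vl (k - 1) = true := (hmark_km1 hk0).2 hdot
              rw [hmk, hmk1]
            · have hmk : pvMark n (k : Int) vl (k - 1) = false := by
                cases h : pvMark n (k : Int) vl (k - 1)
                · rfl
                · exact absurd ((pvMark_iff n (k : Int) vl (k - 1)).1 h).1 hdot
              have hmk1 : pvMark n ((k : Int) + 1) vl (k - 1) = false := by
                cases h : pvMark n ((k : Int) + 1) vl (k - 1)
                · rfl
                · exact absurd ((hmark_km1 hk0).1 h) hdot
              rw [hmk, hmk1]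
          · rw [pvMark_succ_ne n (k : Int) vl j (by omega) (by omega)]
      · rw [if_neg c2]
        show pvBuild n (k : Int) vl = pvBuild n ((k : Int) + 1) vl
        apply List.ext_getElem (by simp [pvBuild_length])
        intro j hj1 hj2
        have hjm : j < vl.length := by simpa [pvBuild_length] using hj2
        rw [pvBuild_getElem n (k : Int) vl j hjm, pvBuild_getElem n ((k : Int) + 1) vl j hjm]
        by_cases e2 : k + 1 = j
        · rw [← e2, hm_kp1]
          have : pvMark n ((k : Int) + 1) vl (k + 1) = false := by
            cases h : pvMark n ((k : Int) + 1) vl (k + 1)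
            · rfl
            · exfalso
              have hfac := hmark_kp1.1 h
              exact c2 ⟨by omega, by rw [hsetval2]; exact hfac.1⟩
          rw [this]
        · by_cases e1 : 0 < k ∧ k - 1 = j
          · rcases e1 with ⟨hk0, e1⟩
            subst e1
            by_cases hdot : vl.getD (k - 1) ' ' = '.'
            · have hmk : pvMark n (k : Int) vl (k - 1) = true := by
                cases h : pvMark n (k : Int) vl (k - 1)
                · exfalso
                  apply c1
                  refine ⟨by omega, ?_⟩
                  rw [show (k : Int) - 1 = ((k - 1 : Nat) : Int) by omega, hlook (k - 1) (by omega), h]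
                  simpa using hdot
                · rfl
              have hmk1 : pvMark n ((k : Int) + 1) vl (k - 1) = true := (hmark_km1 hk0).2 hdot
              rw [hmk, hmk1]
            · have hmk : pvMark n (k : Int) vl (k - 1) = false := by
                cases h : pvMark n (k : Int) vl (k - 1)
                · rfl
                · exact absurd ((pvMark_iff n (k : Int) vl (k - 1)).1 h).1 hdot
              have hmk1 : pvMark n ((k : Int) + 1) vl (k - 1) = false := by
                cases h : pvMark n ((k : Int) + 1) vl (k - 1)
                · rfl
                · exact absurd ((hmark_km1 hk0).1 h) hdot
              rw [hmk, hmk1]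
          · rw [pvMark_succ_ne n (k : Int) vl j (by omega) (by omega)]
  · -- no house at k: nothing changes
    have houter : ¬ PySem.List.pyGetD (pvBuild n (k : Int) vl) ((k : Nat) : Int) ' ' = 'H' := by
      rw [hlook k hkm]
      cases h : pvMark n (k : Int) vl k
      · simpa using hH
      · simp
    simp only [pvStepA]
    rw [if_neg houter]
    show pvBuild n (k : Int) vl = pvBuild n ((k : Int) + 1) vl
    apply List.ext_getElem (by simp [pvBuild_length])
    intro j hj1 hj2
    have hjm : j < vl.length := by simpa [pvBuild_length] using hj2
    rw [pvBuild_getElem n (k : Int) vl j hjm, pvBuild_getElem n ((k : Int) + 1) vl j hjm,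
        pvMark_succ_notH n (k : Int) vl j k rfl hH]

theorem foldl_pvStepA_build (n : Int) (vl : List Char) (hn : n ≤ (vl.length : Int)) (k : Nat)
    (hk : (k : Int) ≤ n) :
    ((PySem.List.pyRange 0 (k : Int) 1).foldl (pvStepA n) (vl, 0)).1 = pvBuild n (k : Int) vl := by
  induction k with
  | zero =>
      rw [PySem.List.pyRange_one_eq_nil (by omega)]
      simp [pvBuild_zero]
  | succ k ih =>
      have h1 : ((k : Int)) ≤ n := by push_cast at hk ⊢; omega
      have h2 : (((k + 1 : Nat)) : Int) = (k : Int) + 1 := by push_cast; ring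
      rw [h2, PySem.List.pyRange_one_succ_right (by omega)]
      rw [List.foldl_append]
      simp only [List.foldl_cons, List.foldl_nil]
      rw [pvStepA_fst, ih h1]
      exact pvStepA_build n vl k (by omega) hn

theorem pvCheckA_true (n : Int) (vl : List Char) (l : List Int)
    (h : ∀ i ∈ l, 0 ≤ i ∧ i < n) : pvCheckA n vl l = true := by
  induction l with
  | nil => rfl
  | cons i rest ih =>
      have hi := h i (by simp)
      have hrest : ∀ j ∈ rest, 0 ≤ j ∧ j < n := fun j hj => h j (by simp [hj])
      by_cases hH : PySem.List.pyGetD vl i ' ' = 'H'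
      · have hL : pvWhileLeft vl i = i := by rw [pvWhileLeft]; simp [hH]
        have hR : pvWhileRight n vl i = i := by rw [pvWhileRight]; simp [hH]
        simp only [pvCheckA, hL, hR, hH, reduceIte, and_true]
        rw [if_pos hi.1, if_pos hi.2]
        rw [if_neg (by omega : ¬ (i + 1 = i ∧ i - 1 = i))]
        rw [if_neg (by omega : ¬ ¬ (i - (i + 1) = i - 1 - i))]
        exact ih hrest
      · simp only [pvCheckA]
        rw [if_neg hH]
        exact ih hrest

theorem alt_eq_build (n : Int) (vl : List Char) (hn : n ≤ (vl.length : Int)) :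
    (PySem.List.enumerate vl 0).map (fun p =>
      if p.1 < n ∧ p.2 = '.' ∧
          ((0 < p.1 ∧ PySem.List.pyGetD vl (p.1 - 1) ' ' = 'H') ∨
           (p.1 < n - 1 ∧ PySem.List.pyGetD vl (p.1 + 1) ' ' = 'H')) then 'B' else p.2)
    = pvBuild n n vl := by
  apply List.ext_getElem (by simp [pvBuild_length, PySem.List.length_enumerate])
  intro j h1 h2
  have hj : j < vl.length := by simpa [pvBuild_length] using h2
  rw [List.getElem_map, PySem.List.getElem_enumerate]
  dsimp only
  rw [pvBuild_getElem n n vl j hj]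
  have hgd : vl.getD j ' ' = vl[j] := List.getD_eq_getElem _ _ hj
  have hR' : PySem.List.pyGetD vl ((0 : Int) + (j : Int) + 1) ' ' = vl.getD (j + 1) ' ' := by
    have : (0 : Int) + (j : Int) + 1 = ((j + 1 : Nat) : Int) := by omega
    rw [this, PySem.List.pyGetD_natCast]
  have hiff : ((0 : Int) + (j : Int) < n ∧ vl[j] = '.' ∧
      ((0 < (0 : Int) + (j : Int) ∧ PySem.List.pyGetD vl ((0 : Int) + (j : Int) - 1) ' ' = 'H') ∨
       ((0 : Int) + (j : Int) < n - 1 ∧ PySem.List.pyGetD vl ((0 : Int) + (j : Int) + 1) ' ' = 'H')))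
      ↔ pvMark n n vl j = true := by
    rw [pvMark_iff, hgd]
    constructor
    · rintro ⟨hjn, hdot, ⟨hj0, hlH⟩ | ⟨hjn1, hrH⟩⟩
      · refine ⟨hdot, Or.inr ⟨by omega, by omega, by omega, ?_⟩⟩
        have : (0 : Int) + (j : Int) - 1 = ((j - 1 : Nat) : Int) := by omega
        rw [this, PySem.List.pyGetD_natCast] at hlH
        exact hlH
      · refine ⟨hdot, Or.inl ⟨by omega, ?_⟩⟩
        rw [hR'] at hrH
        exact hrH
    · rintro ⟨hdot, ⟨ha, hb⟩ | ⟨ha, hb, hc, he⟩⟩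
      · refine ⟨by omega, hdot, Or.inr ⟨by omega, by rw [hR']; exact hb⟩⟩
      · refine ⟨by omega, hdot, Or.inl ⟨by omega, ?_⟩⟩
        have : (0 : Int) + (j : Int) - 1 = ((j - 1 : Nat) : Int) := by omega
        rw [this, PySem.List.pyGetD_natCast]
        exact he
  exact if_congr hiff rfl hgd.symm

-- ===== VERDICT (by name: the statement is the Claim_ definition above) =====
theorem split_houses_spec : Claim_equal_split_houses := by
  intro n village _ hpre
  unfold Spec_split_houses split_houses split_houses_alt
  dsimp only
  have hn : n ≤ (village.toList.length : Int) := hpre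
  have hchk : pvCheckA n village.toList (PySem.List.pyRange 0 n 1) = true :=
    pvCheckA_true n village.toList _ (by
      intro i hi
      have := (PySem.List.mem_pyRange_one).1 hi
      omega)
  rw [if_pos hchk]
  rw [alt_eq_build n village.toList hn]
  by_cases h0 : 0 ≤ n
  · have hkc : ((n.toNat : Nat) : Int) = n := Int.toNat_of_nonneg h0
    have hfold := foldl_pvStepA_build n village.toList hn n.toNat (by omega)
    rw [hkc] at hfold
    rw [hfold]
  · rw [PySem.List.pyRange_one_eq_nil (by omega)]
    simp only [List.foldl_nil]
    have hm : ∀ j, pvMark n n village.toList j = false := by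
      intro j
      cases h : pvMark n n village.toList j
      · rfl
      · exfalso
        rcases (pvMark_iff n n village.toList j).1 h with ⟨-, ⟨ha, -⟩ | ⟨-, hb, -, -⟩⟩ <;> omega
    have hbv : pvBuild n n village.toList = village.toList := by
      apply List.ext_getElem (by simp [pvBuild_length])
      intro j h1 h2
      rw [pvBuild_getElem n n village.toList j h2, hm j]
      simpa using (List.getD_eq_getElem village.toList ' ' h2)
    rw [hbv]
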